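-- pv_equiv track=rewrite | github.com/boto/botoflow | lib/awsflow/core/utils.py | split_stack
-- ===== SOURCE A (Python) =====
-- def split_stack(stack):
--     """
--     Splits the stack into two, before and after the framework
--     """
--     stack_before, stack_after = list(), list()
--     in_before = True
--     for frame in stack:
--         if 'flow/core' in frame[0]:
--             in_before = False
--         else:
--             if in_before:
--                 stack_before.append(frame)
--             else:
--                 stack_after.append(frame)
--     return stack_before, stack_after
-- ===== SOURCE B (Python) =====
-- def split_stack(stack):
--     """
--     Splits the stack into two, before and after the framework
--     """
--     idx = next((i for i, f in enumerate(stack) if 'flow/core' in f[0]), len(stack))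
--     stack_before = stack[:idx]
--     stack_after = [f for f in stack[idx + 1:] if 'flow/core' not in f[0]]
--     return stack_before, stack_after
-- ===== Notes on version B (the rewrite author's own statement) =====
-- stated objective: alternative
-- what changed: Replaces the stateful in_before flag loop with a locate-the-boundary-then-slice/filter decomposition: find the index of the first framework frame, take the prefix before it, and filter framework frames out of the suffix after it.
import Mathlib
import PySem

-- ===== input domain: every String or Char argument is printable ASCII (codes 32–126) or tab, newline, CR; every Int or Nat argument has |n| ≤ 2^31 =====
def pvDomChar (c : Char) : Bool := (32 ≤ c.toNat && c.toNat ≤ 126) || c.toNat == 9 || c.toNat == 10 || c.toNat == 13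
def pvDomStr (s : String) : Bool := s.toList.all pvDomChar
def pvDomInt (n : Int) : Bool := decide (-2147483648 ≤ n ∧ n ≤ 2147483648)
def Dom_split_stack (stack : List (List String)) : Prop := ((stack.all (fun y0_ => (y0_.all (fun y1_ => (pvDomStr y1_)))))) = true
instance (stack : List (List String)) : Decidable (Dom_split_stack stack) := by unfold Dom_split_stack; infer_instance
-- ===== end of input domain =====

-- B replaces A's stateful in_before-flag loop by a locate-boundary-then-slice/filter decomposition (alternative, same cost).

-- ===== PORT A =====
-- 'flow/core' in frame[0]  (frame[0] exists for every frame admitted by Pre_)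
def pvIsFw (frame : List String) : Bool :=
  PySem.Str.isIn "flow/core" (PySem.List.pyGetD frame 0 "")

def split_stack (stack : List (List String)) : List (List String) × List (List String) :=
  let r := stack.foldl
    (fun (st : List (List String) × List (List String) × Bool) frame =>
      if pvIsFw frame then (st.1, st.2.1, false)
      else if st.2.2 then (st.1 ++ [frame], st.2.1, st.2.2)
      else (st.1, st.2.1 ++ [frame], st.2.2))
    ([], [], true)
  (r.1, r.2.1)

-- ===== PORT B =====
def split_stack_alt (stack : List (List String)) : List (List String) × List (List String) :=
  match stack.findIdx? pvIsFw with
  | none   => (stack, [])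
  | some i => (stack.take i, (stack.drop (i + 1)).filter (fun f => !pvIsFw f))

-- ===== PRECONDITION & SPEC =====
-- Pre_ excludes inputs containing an empty frame: there 'frame[0]' raises IndexError in both A and B.
def Pre_split_stack (stack : List (List String)) : Prop := ∀ f ∈ stack, f ≠ []
instance (stack : List (List String)) : Decidable (Pre_split_stack stack) := by unfold Pre_split_stack; infer_instance
def pvWitness_split_stack : List (List String) := [["a.py"], ["x/flow/core/y.py"], ["b.py"]]

def Spec_split_stack (stack : List (List String)) (out : List (List String) × List (List String)) : Prop := out = split_stack_alt stack
instance (stack : List (List String)) (out : List (List String) × List (List String)) : Decidable (Spec_split_stack stack out) := by unfold Spec_split_stack; infer_instance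

-- ===== CLAIM (what is proved, stated in full; the proofs are below) =====
def Claim_equal_split_stack : Prop := ∀ (stack : List (List String)), Dom_split_stack stack → Pre_split_stack stack → Spec_split_stack stack (split_stack stack)

-- ===== LEMMAS AND PROOFS =====
-- abbreviation for A's loop body
def pvStep (st : List (List String) × List (List String) × Bool) (frame : List String) :
    List (List String) × List (List String) × Bool :=
  if pvIsFw frame then (st.1, st.2.1, false)
  else if st.2.2 then (st.1 ++ [frame], st.2.1, st.2.2)
  else (st.1, st.2.1 ++ [frame], st.2.2)

-- after the flag dropped to false, the loop only filters into the second list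
lemma pvLoop_false (l : List (List String)) (b a : List (List String)) :
    l.foldl pvStep (b, a, false) = (b, a ++ l.filter (fun f => !pvIsFw f), false) := by
  induction l generalizing a with
  | nil => simp
  | cons f t ih =>
      by_cases h : pvIsFw f
      · simp [pvStep, h, ih]
      · simp [pvStep, h, ih, List.append_assoc]

-- while the flag is true, the loop matches B's boundary decomposition
lemma pvLoop_true (l : List (List String)) (b : List (List String)) :
    l.foldl pvStep (b, [], true) =
      match l.findIdx? pvIsFw with
      | none   => (b ++ l, [], true)
      | some i => (b ++ l.take i, (l.drop (i + 1)).filter (fun f => !pvIsFw f), false) := by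
  induction l generalizing b with
  | nil => simp
  | cons f t ih =>
      by_cases h : pvIsFw f
      · simp [pvStep, h, List.findIdx?_cons, pvLoop_false]
      · rw [List.foldl_cons, show pvStep (b, [], true) f = (b ++ [f], [], true) by
              simp [pvStep, h], ih]
        simp [List.findIdx?_cons, h]
        cases t.findIdx? pvIsFw <;> simp

-- ===== VERDICT (by name: the statement is the Claim_ definition above) =====
theorem split_stack_spec : Claim_equal_split_stack := by
  intro stack _ _
  unfold Spec_split_stack split_stack split_stack_alt
  show (let r := stack.foldl pvStep ([], [], true); (r.1, r.2.1)) = _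
  rw [pvLoop_true]
  cases stack.findIdx? pvIsFw <;> simp
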